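-- pv_equiv track=rewrite | github.com/abunuwas/python-trees | nodes.py | buildTreeGroundUp
-- ===== SOURCE A (Python) =====
-- def buildTreeGroundUp(tree):
--     '''
--     This function takes as input a tree in the form of a list of lists, in which each row
--     is a list where every element is an independent member of the list. The function returns a
--     dictionary of nodes from the tree. Because it is a dictionary, nodes are not stored in any
--     particular order, and cannot be accesed by index. However, every node in the tree can be
--     found with precision via its properties in the dictionary, in particular 'row' and
--     'position' (this refers to its index in the row, starting from index 0). This function
--     builds the tree from the ground up, so it is necessary to pass in an inverted tree as
--     an argument.
--     '''
--     nodes = {}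
--     nodeCounter = 0
--     justAdded=[]
--     to_add = []
--     for index, line in enumerate(tree):
--         adding=[]
--         for position, value in enumerate(line):
--             if index == 0:
--                 nodeCounter += 1
--                 nodes[nodeCounter] = {'value': value,
--                                'L': None,
--                                'R': None,
--                                'row': index,
--                                'position': position}
--                 adding.append(nodeCounter)
--             else:
--                 nodeCounter += 1
--                 nodes[nodeCounter] = {'value': value,
--                                       'row': index,
--                                       'position': position}
--                 for node in justAdded:
--                     if nodes[node]['position'] == position and nodes[node]['row'] == index-1:
--                         nodes[nodeCounter]['L'] = node
--
--                     elif nodes[node]['position'] == position+1 and nodes[node]['row'] == index-1: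
--                         nodes[nodeCounter]['R'] = node
--                 adding.append(nodeCounter)
--
--         justAdded = set(adding)
--
--     return nodes
-- ===== SOURCE B (Python) =====
-- def buildTreeGroundUp(tree):
--     # Pass 1: assign ids in row-major order into a layout table.
--     ids = []
--     n = 0
--     for line in tree:
--         row_ids = []
--         for _ in line:
--             n += 1
--             row_ids.append(n)
--         ids.append(row_ids)
--     # Pass 2: build each node dict, linking children directly via the table.
--     nodes = {}
--     for r, line in enumerate(tree):
--         for p, v in enumerate(line):
--             if r == 0:
--                 nodes[ids[r][p]] = {'value': v, 'L': None, 'R': None,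
--                                     'row': r, 'position': p}
--             else:
--                 d = {'value': v, 'row': r, 'position': p}
--                 prev = ids[r - 1]
--                 if p < len(prev):
--                     d['L'] = prev[p]
--                 if p + 1 < len(prev):
--                     d['R'] = prev[p + 1]
--                 nodes[ids[r][p]] = d
--     return nodes
-- ===== Notes on version B (the rewrite author's own statement) =====
-- stated objective: faster
-- what changed: Replaces A's per-node scan of the previously-added id set with a precomputed row-major id table (first pass), so each node's L/R children are linked by direct index into the previous row's ids (second pass).
import Mathlib
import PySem

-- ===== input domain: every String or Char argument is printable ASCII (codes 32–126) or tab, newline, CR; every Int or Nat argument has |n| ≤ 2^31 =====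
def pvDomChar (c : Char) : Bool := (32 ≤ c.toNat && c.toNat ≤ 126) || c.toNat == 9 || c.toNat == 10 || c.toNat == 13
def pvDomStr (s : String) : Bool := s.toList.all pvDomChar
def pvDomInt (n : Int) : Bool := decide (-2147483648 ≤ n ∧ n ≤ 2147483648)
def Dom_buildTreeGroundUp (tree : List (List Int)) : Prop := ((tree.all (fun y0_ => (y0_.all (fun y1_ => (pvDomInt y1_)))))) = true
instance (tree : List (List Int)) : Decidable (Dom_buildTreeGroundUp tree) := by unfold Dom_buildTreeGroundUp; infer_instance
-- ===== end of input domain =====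

-- B replaces A's per-node scan of the previously-added id set with a precomputed
-- row-major id table, linking each node's L/R children by direct index into the
-- previous row (objective: faster).


-- ===== PORT A =====
-- State: (nodes, nodeCounter, adding/justAdded), exactly Python A's variables.
-- nodes[node]['position'] / ['row'] lookups can never miss (justAdded holds keys of
-- nodes), so getD with a default is exact here.
abbrev NDict : Type := PySem.Dict Int (PySem.Dict String (Option Int))

def AJStep (index position nodeCounter : Int) (nodes : NDict) (node : Int) : NDict :=
  if ((nodes.getD node ⟨[]⟩).getD "position" none == some position
      && (nodes.getD node ⟨[]⟩).getD "row" none == some (index - 1)) then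
    nodes.modify nodeCounter ⟨[]⟩ (fun d => d.insert "L" (some node))
  else if ((nodes.getD node ⟨[]⟩).getD "position" none == some (position + 1)
      && (nodes.getD node ⟨[]⟩).getD "row" none == some (index - 1)) then
    nodes.modify nodeCounter ⟨[]⟩ (fun d => d.insert "R" (some node))
  else nodes

def AInnerStep (index : Int) (justAdded : List Int)
    (st : NDict × Int × List Int) (pv : Int × Int) : NDict × Int × List Int :=
  let position := pv.1
  let value := pv.2
  if index == 0 then
    let nodeCounter := st.2.1 + 1
    let nodes := st.1.insert nodeCounter
      ⟨[("value", some value), ("L", none), ("R", none), ("row", some index), ("position", some position)]⟩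
    (nodes, nodeCounter, st.2.2 ++ [nodeCounter])
  else
    let nodeCounter := st.2.1 + 1
    let nodes := st.1.insert nodeCounter
      ⟨[("value", some value), ("row", some index), ("position", some position)]⟩
    let nodes := justAdded.foldl (AJStep index position nodeCounter) nodes
    (nodes, nodeCounter, st.2.2 ++ [nodeCounter])

def AOuterStep (st : NDict × Int × List Int) (il : Int × List Int) : NDict × Int × List Int :=
  let st2 := (PySem.List.enumerate il.2).foldl (AInnerStep il.1 st.2.2) (st.1, st.2.1, [])
  (st2.1, st2.2.1, PySem.Set.ofList st2.2.2)

def buildTreeGroundUp (tree : List (List Int)) : List (Int × List (String × Option Int)) :=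
  let st := (PySem.List.enumerate tree).foldl AOuterStep (PySem.Dict.empty, 0, [])
  st.1.items.map (fun kv => (kv.1, kv.2.items))

-- ===== PORT B =====
def BRowIds (st : List (List Int) × Int) (line : List Int) : List (List Int) × Int :=
  let row := line.foldl (fun (st2 : List Int × Int) _ => (st2.1 ++ [st2.2 + 1], st2.2 + 1)) ([], st.2)
  (st.1 ++ [row.1], row.2)

-- The node dict for row r, position p, value v; prev = id row r-1 (unused when r = 0).
def BEntry (prev : List Int) (r p v : Int) : PySem.Dict String (Option Int) :=
  if r == 0 then
    ⟨[("value", some v), ("L", none), ("R", none), ("row", some r), ("position", some p)]⟩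
  else
    let d : PySem.Dict String (Option Int) := ⟨[("value", some v), ("row", some r), ("position", some p)]⟩
    let d := if p < (prev.length : Int) then d.insert "L" (some (PySem.List.pyGetD prev p 0)) else d
    if p + 1 < (prev.length : Int) then d.insert "R" (some (PySem.List.pyGetD prev (p + 1) 0)) else d

-- ids[r][p] / ids[r-1] are always in range in Source B, so pyGetD with a default is exact.
def BInnerStep (ids : List (List Int)) (r : Int) (nodes : NDict) (pv : Int × Int) : NDict :=
  nodes.insert (PySem.List.pyGetD (PySem.List.pyGetD ids r []) pv.1 0)
    (BEntry (PySem.List.pyGetD ids (r - 1) []) r pv.1 pv.2)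

def buildTreeGroundUp_alt (tree : List (List Int)) : List (Int × List (String × Option Int)) :=
  let pass1 := tree.foldl BRowIds ([], 0)
  let nodes := (PySem.List.enumerate tree).foldl
    (fun (nodes : NDict) rl => (PySem.List.enumerate rl.2).foldl (BInnerStep pass1.1 rl.1) nodes)
    PySem.Dict.empty
  nodes.items.map (fun kv => (kv.1, kv.2.items))

-- ===== PRECONDITION & SPEC =====
def Spec_buildTreeGroundUp (tree : List (List Int)) (out : List (Int × List (String × Option Int))) : Prop := out = buildTreeGroundUp_alt tree
instance (tree : List (List Int)) (out : List (Int × List (String × Option Int))) : Decidable (Spec_buildTreeGroundUp tree out) := by unfold Spec_buildTreeGroundUp; infer_instance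

-- ===== CLAIM (what is proved, stated in full; the proofs are below) =====
def Claim_equal_buildTreeGroundUp : Prop := ∀ (tree : List (List Int)), Dom_buildTreeGroundUp tree → Spec_buildTreeGroundUp tree (buildTreeGroundUp tree)

-- ===== LEMMAS AND PROOFS =====

-- the common closed form both ports are proved equal to
def cntL (l : List (List Int)) : Int := ((l.map List.length).sum : Nat)


def idsRow (b : Int) (m : Nat) : List Int := (List.range m).map (fun (q : Nat) => b + (q : Int) + 1)

def idsFrom (c : Int) : List (List Int) → List (List Int)
  | [] => []
  | line :: rest => idsRow c line.length :: idsFrom (c + line.length) rest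

def rowEnt (c r p : Int) (prev : List Int) : List Int → List (Int × PySem.Dict String (Option Int))
  | [] => []
  | v :: vs => (c + 1, BEntry prev r p v) :: rowEnt (c + 1) r (p + 1) prev vs

def specRows (c r : Int) (prev : List Int) : List (List Int) → List (Int × PySem.Dict String (Option Int))
  | [] => []
  | line :: rest => rowEnt c r 0 prev line ++ specRows (c + line.length) (r + 1) (idsRow c line.length) rest

-- ---- generic Dict-on-literal-list facts ----
lemma dict_insert_fresh {ν : Type} (E : List (Int × ν)) (k : Int) (v : ν)
    (h : ∀ pr ∈ E, pr.1 ≠ k) :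
    PySem.Dict.insert ⟨E⟩ k v = (⟨E ++ [(k, v)]⟩ : PySem.Dict Int ν) := by
  have hc : (⟨E⟩ : PySem.Dict Int ν).contains k = false := by
    rw [PySem.Dict.contains_mk]
    simp only [List.any_eq_false]
    intro p hp; simpa using h p hp
  simp [PySem.Dict.insert, hc]

lemma dict_insert_last {ν : Type} (E : List (Int × ν)) (k : Int) (d v : ν)
    (h : ∀ pr ∈ E, pr.1 ≠ k) :
    PySem.Dict.insert ⟨E ++ [(k, d)]⟩ k v = (⟨E ++ [(k, v)]⟩ : PySem.Dict Int ν) := by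
  have hc : (⟨E ++ [(k, d)]⟩ : PySem.Dict Int ν).contains k = true := by
    rw [PySem.Dict.contains_mk]; simp
  simp only [PySem.Dict.insert, hc, if_pos, List.map_append]
  congr 1
  have h1 : List.map (fun p => if (p.1 == k) = true then (k, v) else p) E = List.map id E := by
    apply List.map_congr_left
    intro p hp
    have := h p hp
    simp [this]
  rw [h1, List.map_id]
  simp

lemma dict_get?_append_right {ν : Type} (E F : List (Int × ν)) (k : Int)
    (h : ∀ pr ∈ E, pr.1 ≠ k) :
    PySem.Dict.get? (⟨E ++ F⟩ : PySem.Dict Int ν) k = PySem.Dict.get? (⟨F⟩ : PySem.Dict Int ν) k := by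
  have hE : List.find? (fun p => p.1 == k) E = none := by
    rw [List.find?_eq_none]; intro p hp; simpa using h p hp
  simp [PySem.Dict.get?, List.find?_append, hE]

lemma dict_get?_append_left {ν : Type} (E F : List (Int × ν)) (k : Int)
    (h : ∀ pr ∈ F, pr.1 ≠ k) :
    PySem.Dict.get? (⟨E ++ F⟩ : PySem.Dict Int ν) k = PySem.Dict.get? (⟨E⟩ : PySem.Dict Int ν) k := by
  have hF : List.find? (fun p => p.1 == k) F = none := by
    rw [List.find?_eq_none]; intro p hp; simpa using h p hp
  simp [PySem.Dict.get?, List.find?_append, hF]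

lemma dict_getD_last {ν : Type} (E : List (Int × ν)) (k : Int) (d d0 : ν)
    (h : ∀ pr ∈ E, pr.1 ≠ k) :
    PySem.Dict.getD (⟨E ++ [(k, d)]⟩ : PySem.Dict Int ν) k d0 = d := by
  apply PySem.Dict.getD_of_get?_eq_some
  rw [dict_get?_append_right _ _ _ h, PySem.Dict.get?_mk_cons]
  simp

lemma idsRow_succ (b : Int) (m : Nat) : idsRow b (m+1) = (b + 1) :: idsRow (b+1) m := by
  unfold idsRow
  rw [List.range_succ_eq_map, List.map_cons, List.map_map]
  congr 1
  · ring
  · apply List.map_congr_left; intro q hq; simp only [Function.comp_apply]; push_cast; ring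

lemma idsRow_append (b : Int) (m : Nat) : idsRow b (m + 1) = idsRow b m ++ [b + m + 1] := by
  unfold idsRow
  rw [List.range_succ, List.map_append]
  simp

lemma idsRow_nodup (b : Int) (m : Nat) : (idsRow b m).Nodup := by
  unfold idsRow
  apply List.Nodup.map ?_ (List.nodup_range)
  intro x y hxy
  simp only at hxy
  omega

lemma idsRow_get (b : Int) (m : Nat) (p : Int) (h0 : 0 ≤ p) (h : p < (m : Int)) :
    PySem.List.pyGetD (idsRow b m) p 0 = b + p + 1 := by
  obtain ⟨q, rfl⟩ : ∃ q : Nat, (q:Int) = p := ⟨p.toNat, Int.toNat_of_nonneg h0⟩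
  have hq : q < m := by exact_mod_cast h
  unfold idsRow
  rw [PySem.List.pyGetD_map_natCast _ _ _ _ (by simpa)]
  simp

lemma idsRow_length (b : Int) (m : Nat) : (idsRow b m).length = m := by
  simp [idsRow]

-- ---- idsRow facts ----
-- ---- BEntry field facts ----
lemma BEntry_get_base (prev : List Int) (r p v : Int) (key : String)
    (hL : key ≠ "L") (hR : key ≠ "R") :
    PySem.Dict.get? (BEntry prev r p v) key
      = PySem.Dict.get? (⟨[("value", some v), ("row", some r), ("position", some p)]⟩ : PySem.Dict String (Option Int)) key
      ∨ (r = 0 ∧ BEntry prev r p v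
          = ⟨[("value", some v), ("L", none), ("R", none), ("row", some r), ("position", some p)]⟩) := by
  unfold BEntry
  by_cases h0 : r = 0
  · right; simp [h0]
  · left
    have h0' : (r == 0) = false := by simpa using h0
    rw [h0']
    simp only [Bool.false_eq_true, if_false]
    split_ifs with h1 h2 h3 <;>
      simp only [PySem.Dict.get?_insert_of_ne _ _ hL, PySem.Dict.get?_insert_of_ne _ _ hR]

lemma BEntry_position (prev : List Int) (r p v : Int) :
    (BEntry prev r p v).getD "position" none = some p := by
  rcases BEntry_get_base prev r p v "position" (by decide) (by decide) with h | ⟨_, h⟩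
  · apply PySem.Dict.getD_of_get?_eq_some
    rw [h]
    simp [PySem.Dict.get?_mk_cons]
  · rw [h]
    apply PySem.Dict.getD_of_get?_eq_some
    simp [PySem.Dict.get?_mk_cons]

lemma BEntry_row (prev : List Int) (r p v : Int) :
    (BEntry prev r p v).getD "row" none = some r := by
  rcases BEntry_get_base prev r p v "row" (by decide) (by decide) with h | ⟨_, h⟩
  · apply PySem.Dict.getD_of_get?_eq_some
    rw [h]
    simp [PySem.Dict.get?_mk_cons]
  · rw [h]
    apply PySem.Dict.getD_of_get?_eq_some
    simp [PySem.Dict.get?_mk_cons]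

lemma BEntry_zero (prev prev' : List Int) (p v : Int) :
    BEntry prev 0 p v = BEntry prev' 0 p v := by
  simp [BEntry]

-- ---- rowEnt facts ----
lemma rowEnt_zero_prev (prev prev' : List Int) (line : List Int) : ∀ (c p : Int),
    rowEnt c 0 p prev line = rowEnt c 0 p prev' line := by
  induction line with
  | nil => intro c p; rfl
  | cons v vs ih =>
    intro c p
    simp only [rowEnt, ih]
    rw [BEntry_zero prev prev']

lemma rowEnt_keys (r : Int) (prev : List Int) (line : List Int) : ∀ (c p : Int),
    ∀ pr ∈ rowEnt c r p prev line, c < pr.1 ∧ pr.1 ≤ c + line.length := by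
  induction line with
  | nil => intro c p pr hpr; simp [rowEnt] at hpr
  | cons v vs ih =>
    intro c p pr hpr
    simp only [rowEnt, List.mem_cons] at hpr
    rcases hpr with rfl | hpr
    · simp
    · have := ih (c + 1) (p + 1) pr hpr
      simp only [List.length_cons]
      push_cast
      omega

lemma rowEnt_get (r : Int) (prev : List Int) (line : List Int) :
    ∀ (c p0 : Int) (j : Nat), j < line.length →
    PySem.Dict.get? (⟨rowEnt c r p0 prev line⟩ : NDict) (c + j + 1)
      = some (BEntry prev r (p0 + j) (line.getD j 0)) := by
  induction line with
  | nil => intro c p0 j hj; simp at hj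
  | cons v vs ih =>
    intro c p0 j hj
    match j with
    | 0 => simp [rowEnt, PySem.Dict.get?_mk_cons]
    | Nat.succ j =>
      rw [rowEnt, PySem.Dict.get?_mk_cons]
      have hne : (c + (Nat.succ j : Nat) + 1 == c + 1) = false := by
        simp only [beq_eq_false_iff_ne, ne_eq]
        push_cast
        omega
      rw [BEq.comm] at hne
      rw [hne]
      simp only [Bool.false_eq_true, if_false]
      have := ih (c + 1) (p0 + 1) j (by simpa using hj)
      have hkey : c + (Nat.succ j : Nat) + 1 = (c + 1) + (j : Nat) + 1 := by push_cast; ring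
      have hpos : (p0 + 1) + (j : Nat) = p0 + (Nat.succ j : Nat) := by push_cast; ring
      rw [hkey, this, hpos]
      simp

-- ---- B: pass 1 ----
lemma cntL_cons (line : List Int) (rest : List (List Int)) :
    cntL (line :: rest) = line.length + cntL rest := by
  simp [cntL]

lemma B_pass1_row (line : List Int) : ∀ (acc : List Int) (c : Int),
    line.foldl (fun (st2 : List Int × Int) _ => (st2.1 ++ [st2.2 + 1], st2.2 + 1)) (acc, c)
      = (acc ++ idsRow c line.length, c + line.length) := by
  induction line with
  | nil => intro acc c; simp [idsRow]
  | cons v vs ih =>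
    intro acc c
    simp only [List.foldl_cons, List.length_cons, ih, idsRow_succ, Prod.mk.injEq]
    refine ⟨by simp, by push_cast; ring⟩

lemma B_pass1 (tree : List (List Int)) : ∀ (acc : List (List Int)) (c : Int),
    tree.foldl BRowIds (acc, c) = (acc ++ idsFrom c tree, c + cntL tree) := by
  induction tree with
  | nil => intro acc c; simp [idsFrom, cntL]
  | cons line rest ih =>
    intro acc c
    simp only [List.foldl_cons, BRowIds, B_pass1_row, ih, idsFrom, Prod.mk.injEq]
    refine ⟨by simp, by rw [cntL_cons]; ring⟩

lemma idsFrom_append (xs ys : List (List Int)) : ∀ (c : Int),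
    idsFrom c (xs ++ ys) = idsFrom c xs ++ idsFrom (c + cntL xs) ys := by
  induction xs with
  | nil => intro c; simp [idsFrom, cntL]
  | cons line rest ih =>
    intro c
    rw [List.cons_append]
    show idsRow c line.length :: idsFrom (c + line.length) (rest ++ ys) = _
    rw [idsFrom, List.cons_append, ih]
    congr 2
    rw [cntL_cons, add_assoc]

lemma idsFrom_length (xs : List (List Int)) : ∀ (c : Int), (idsFrom c xs).length = xs.length := by
  induction xs with
  | nil => intro c; simp [idsFrom]
  | cons line rest ih => intro c; simp [idsFrom, ih]

lemma idsFrom_get (tree : List (List Int)) (done : List (List Int)) (line : List Int) (rest : List (List Int))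
    (h : tree = done ++ line :: rest) :
    PySem.List.pyGetD (idsFrom 0 tree) (done.length : Int) [] = idsRow (cntL done) line.length := by
  subst h
  rw [idsFrom_append, PySem.List.pyGetD_natCast]
  rw [List.getD_eq_getElem?_getD, List.getElem?_append_right (by simp [idsFrom_length])]
  simp [idsFrom_length, idsFrom]

-- ---- B: pass 2 ----
lemma cntL_append (xs ys : List (List Int)) : cntL (xs ++ ys) = cntL xs + cntL ys := by
  simp [cntL]

lemma cntL_nil : cntL [] = 0 := by simp [cntL]

lemma B_row (ids : List (List Int)) (r : Int) (line : List Int) :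
    ∀ (p0 : Nat) (nodes : NDict) (c : Int)
      (hfresh : ∀ pr ∈ nodes.items, pr.1 ≤ c + p0)
      (hnid : ∀ q : Nat, q < line.length → PySem.List.pyGetD (PySem.List.pyGetD ids r []) ((p0 : Int) + q) 0 = c + (p0 : Int) + q + 1),
    ((PySem.List.enumerate line (p0 : Int)).foldl (BInnerStep ids r) nodes).items
      = nodes.items ++ rowEnt (c + p0) r (p0 : Int) (PySem.List.pyGetD ids (r - 1) []) line := by
  induction line with
  | nil => intro p0 nodes c _ _; simp [rowEnt, PySem.List.enumerate_nil]
  | cons v vs ih =>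
    intro p0 nodes c hfresh hnid
    rw [PySem.List.enumerate.eq_2, List.foldl_cons]
    have hnid0 : PySem.List.pyGetD (PySem.List.pyGetD ids r []) ((p0 : Int)) 0 = c + (p0 : Int) + 1 := by
      have := hnid 0 (by simp)
      simpa using this
    have hstep : BInnerStep ids r nodes ((p0 : Int), v)
        = ⟨nodes.items ++ [(c + (p0 : Int) + 1, BEntry (PySem.List.pyGetD ids (r - 1) []) r (p0 : Int) v)]⟩ := by
      show nodes.insert _ _ = _
      rw [hnid0]
      obtain ⟨E⟩ := nodes
      exact dict_insert_fresh _ _ _ (fun pr hpr => by have := hfresh pr hpr; omega)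
    rw [hstep]
    have hcast : ((p0 : Int)) + 1 = ((p0 + 1 : Nat) : Int) := by push_cast; ring
    rw [hcast]
    rw [ih (p0 + 1) _ c ?_ ?_]
    · rw [rowEnt]
      simp only [List.append_assoc, List.singleton_append]
      congr 2 <;> push_cast <;> ring_nf
    · intro pr hpr
      simp only [List.mem_append, List.mem_singleton] at hpr
      rcases hpr with hpr | rfl
      · have := hfresh pr hpr; push_cast; omega
      · push_cast; omega
    · intro q hq
      have := hnid (q + 1) (by simpa using Nat.succ_lt_succ hq)
      push_cast at this ⊢
      convert this using 2 <;> ring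

lemma B_rows (tree : List (List Int)) (rest : List (List Int)) :
    ∀ (done : List (List Int)) (nodes : NDict)
      (htree : tree = done ++ rest)
      (hfresh : ∀ pr ∈ nodes.items, pr.1 ≤ cntL done)
      (prev : List Int)
      (hprev : done = [] ∨ PySem.List.pyGetD (idsFrom 0 tree) ((done.length : Int) - 1) [] = prev),
    ((PySem.List.enumerate rest (done.length : Int)).foldl
        (fun (nodes : NDict) rl => (PySem.List.enumerate rl.2).foldl (BInnerStep (idsFrom 0 tree) rl.1) nodes)
        nodes).items
      = nodes.items ++ specRows (cntL done) (done.length : Int) prev rest := by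
  induction rest with
  | nil => intro done nodes _ _ prev _; simp [specRows, PySem.List.enumerate_nil]
  | cons line rest' ih =>
    intro done nodes htree hfresh prev hprev
    rw [PySem.List.enumerate.eq_2, List.foldl_cons]
    have hids : PySem.List.pyGetD (idsFrom 0 tree) ((done.length : Int)) [] = idsRow (cntL done) line.length :=
      idsFrom_get tree done line rest' htree
    have hinner := B_row (idsFrom 0 tree) ((done.length : Int)) line 0 nodes (cntL done)
      (by simpa using hfresh)
      (by
        intro q hq
        rw [hids, Nat.cast_zero, zero_add, idsRow_get _ _ _ (by positivity) (by exact_mod_cast hq)]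
        omega)
    have hrow : ((PySem.List.enumerate line ((0 : Nat) : Int)).foldl (BInnerStep (idsFrom 0 tree) (done.length : Int)) nodes).items
        = nodes.items ++ rowEnt (cntL done) (done.length : Int) 0 prev line := by
      rw [hinner]
      rcases hprev with rfl | hprev
      · simp only [List.length_nil, Nat.cast_zero]
        congr 1
        simp only [Nat.cast_zero, add_zero]
        exact rowEnt_zero_prev _ _ line _ _
      · rw [hprev]
        simp
    have hfresh' : ∀ pr ∈ ((PySem.List.enumerate line ((0:Nat) : Int)).foldl (BInnerStep (idsFrom 0 tree) (done.length : Int)) nodes).items,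
        pr.1 ≤ cntL (done ++ [line]) := by
      rw [hrow]
      intro pr hpr
      rw [cntL_append, cntL_cons, cntL_nil]
      simp only [List.mem_append] at hpr
      rcases hpr with hpr | hpr
      · have := hfresh pr hpr
        omega
      · have := rowEnt_keys _ _ line _ _ pr hpr
        omega
    have ihp := ih (done ++ [line])
      (((PySem.List.enumerate line ((0:Nat) : Int)).foldl (BInnerStep (idsFrom 0 tree) (done.length : Int)) nodes))
      (by rw [htree]; simp)
      hfresh'
      (idsRow (cntL done) line.length)
      (Or.inr (by
        simp only [List.length_append, List.length_singleton]
        have : ((done.length + 1 : Nat) : Int) - 1 = (done.length : Int) := by push_cast; ring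
        rw [this, hids]))
    simp only [Nat.cast_zero] at hrow ihp ⊢
    have hlen : ((done ++ [line]).length : Int) = (done.length : Int) + 1 := by simp
    rw [hlen] at ihp
    rw [ihp, hrow, specRows]
    rw [cntL_append, cntL_cons]
    simp [cntL, List.append_assoc]

lemma B_spec (tree : List (List Int)) :
    buildTreeGroundUp_alt tree = (specRows 0 0 [] tree).map (fun kv => (kv.1, kv.2.items)) := by
  unfold buildTreeGroundUp_alt
  have h1 : tree.foldl BRowIds ([], 0) = (idsFrom 0 tree, cntL tree) := by
    rw [B_pass1]
    simp
  rw [h1]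
  dsimp only
  have h2 := B_rows tree tree [] PySem.Dict.empty (by simp) (by simp [PySem.Dict.empty]) [] (Or.inl rfl)
  simp only [List.length_nil, Nat.cast_zero, cntL, List.map_nil, List.sum_nil] at h2
  rw [h2]
  simp [PySem.Dict.empty]

-- ---- A: the justAdded fold ----
lemma A_step (E : List (Int × PySem.Dict String (Option Int))) (nid b' r p j' : Int)
    (dm d : PySem.Dict String (Option Int))
    (hfresh : ∀ pr ∈ E, pr.1 ≠ nid) (hne : b' ≠ nid)
    (hd : PySem.Dict.get? (⟨E⟩ : NDict) b' = some d)
    (hdpos : d.getD "position" none = some j')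
    (hdrow : d.getD "row" none = some (r - 1)) :
    AJStep r p nid ⟨E ++ [(nid, dm)]⟩ b'
      = ⟨E ++ [(nid, if j' = p then dm.insert "L" (some b')
                     else if j' = p + 1 then dm.insert "R" (some b') else dm)]⟩ := by
  have hgd : PySem.Dict.getD (⟨E ++ [(nid, dm)]⟩ : NDict) b' ⟨[]⟩ = d := by
    apply PySem.Dict.getD_of_get?_eq_some
    rw [dict_get?_append_left _ _ _ (by simpa using hne.symm), hd]
  have hmod : ∀ f : PySem.Dict String (Option Int) → PySem.Dict String (Option Int),
      PySem.Dict.modify (⟨E ++ [(nid, dm)]⟩ : NDict) nid ⟨[]⟩ f = ⟨E ++ [(nid, f dm)]⟩ := by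
    intro f
    show PySem.Dict.insert _ _ _ = _
    rw [dict_getD_last _ _ _ _ hfresh, dict_insert_last _ _ _ _ hfresh]
  rw [AJStep, hgd, hdpos, hdrow]
  simp only [beq_self_eq_true, Bool.and_true, beq_iff_eq, Option.some.injEq]
  by_cases h1 : j' = p
  · rw [if_pos (by simp [h1]), hmod, if_pos h1]
  · rw [if_neg (by simp [h1]), if_neg h1]
    by_cases h2 : j' = p + 1
    · rw [if_pos (by simp [h2]), hmod, if_pos h2]
    · rw [if_neg (by simp [h2]), if_neg h2]

lemma BEntry_eq_folded (b r p v : Int) (m : Nat) (hr : ¬ r = 0) (hp : 0 ≤ p) :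
    BEntry (idsRow b m) r p v
      = (if p + 1 < (m : Int) then (fun d => d.insert "R" (some (b + p + 2))) else id)
          ((if p < (m : Int) then (fun d => d.insert "L" (some (b + p + 1))) else id)
            (⟨[("value", some v), ("row", some r), ("position", some p)]⟩ : PySem.Dict String (Option Int))) := by
  unfold BEntry
  rw [if_neg (by simpa using hr)]
  dsimp only
  rw [idsRow_length]
  by_cases h1 : p < (m : Int)
  · rw [if_pos h1, if_pos h1, idsRow_get _ _ _ hp h1]
    by_cases h2 : p + 1 < (m : Int)
    · rw [if_pos h2, if_pos h2, idsRow_get _ _ _ (by omega) h2]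
      have he : b + (p + 1) + 1 = b + p + 2 := by ring
      rw [he]
    · rw [if_neg h2, if_neg h2]
      rfl
  · rw [if_neg h1, if_neg h1, if_neg (by omega), if_neg (by omega)]
    rfl

lemma A_foldJ (b nid r p : Int) (hp : 0 ≤ p) (m : Nat) :
    ∀ (E : List (Int × PySem.Dict String (Option Int))) (d0 : PySem.Dict String (Option Int))
      (hfresh : ∀ pr ∈ E, pr.1 ≠ nid)
      (hb : ∀ j : Nat, j < m → b + j + 1 ≠ nid)
      (Hprev : ∀ j : Nat, j < m → ∃ d, PySem.Dict.get? (⟨E⟩ : NDict) (b + j + 1) = some d ∧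
          d.getD "position" none = some (j : Int) ∧ d.getD "row" none = some (r - 1)),
    (idsRow b m).foldl (AJStep r p nid) ⟨E ++ [(nid, d0)]⟩
      = (⟨E ++ [(nid,
          (if p + 1 < (m : Int) then (fun d => d.insert "R" (some (b + p + 2))) else id)
            ((if p < (m : Int) then (fun d => d.insert "L" (some (b + p + 1))) else id) d0))]⟩ : NDict) := by
  induction m with
  | zero =>
    intro E d0 _ _ _
    rw [show idsRow b 0 = [] by simp [idsRow], List.foldl_nil]
    simp only [Nat.cast_zero]
    rw [if_neg (show ¬ p + 1 < (0:Int) by omega), if_neg (show ¬ p < (0:Int) by omega)]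
    rfl
  | succ m ihm =>
    intro E d0 hfresh hb Hprev
    rw [idsRow_append, List.foldl_append,
      ihm E d0 hfresh (fun j hj => hb j (by omega)) (fun j hj => Hprev j (by omega)),
      List.foldl_cons, List.foldl_nil]
    obtain ⟨d, hd, hdpos, hdrow⟩ := Hprev m (by omega)
    rw [A_step E nid (b + m + 1) r p (m : Int) _ d hfresh (hb m (by omega)) hd hdpos hdrow]
    congr 2
    have hm1 : ((m + 1 : Nat) : Int) = (m : Int) + 1 := by push_cast; ring
    rw [hm1]
    by_cases h1 : (m : Int) = p
    · have hA : ¬ p < (m : Int) := by omega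
      have hB : ¬ p + 1 < (m : Int) := by omega
      have hC : p < (m : Int) + 1 := by omega
      have hD : ¬ p + 1 < (m : Int) + 1 := by omega
      rw [if_pos h1, if_neg hA, if_neg hB, if_pos hC, if_neg hD]
      simp only [id_eq]
      rw [h1]
    · by_cases h2 : (m : Int) = p + 1
      · have hA : p < (m : Int) := by omega
        have hB : ¬ p + 1 < (m : Int) := by omega
        have hC : p < (m : Int) + 1 := by omega
        have hD : p + 1 < (m : Int) + 1 := by omega
        rw [if_neg h1, if_pos h2, if_pos hA, if_neg hB, if_pos hC, if_pos hD]
        simp only [id_eq]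
        rw [h2]
        have he : b + (p + 1) + 1 = b + p + 2 := by ring
        rw [he]
      · rw [if_neg h1, if_neg h2]
        by_cases h3 : p < (m : Int)
        · have hC : p < (m : Int) + 1 := by omega
          rw [if_pos h3, if_pos hC]
          by_cases h4 : p + 1 < (m : Int)
          · have hD : p + 1 < (m : Int) + 1 := by omega
            rw [if_pos h4, if_pos hD]
          · have hD : ¬ p + 1 < (m : Int) + 1 := by omega
            rw [if_neg h4, if_neg hD]
        · have hC : ¬ p < (m : Int) + 1 := by omega
          have h4 : ¬ p + 1 < (m : Int) := by omega
          have hD : ¬ p + 1 < (m : Int) + 1 := by omega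
          rw [if_neg h3, if_neg h4, if_neg hC, if_neg hD]

-- ---- A: one row, index ≥ 1 ----
lemma A_rowN (r : Int) (hr : ¬ r = 0) (b : Int) (m : Nat) (line : List Int) :
    ∀ (p0 : Nat) (E : List (Int × PySem.Dict String (Option Int))) (c : Int) (adding : List Int)
      (hc : c = b + m + p0)
      (hfresh : ∀ pr ∈ E, pr.1 ≤ c)
      (Hprev : ∀ j : Nat, j < m → ∃ d, PySem.Dict.get? (⟨E⟩ : NDict) (b + j + 1) = some d ∧
          d.getD "position" none = some (j : Int) ∧ d.getD "row" none = some (r - 1)),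
    (PySem.List.enumerate line (p0 : Int)).foldl (AInnerStep r (idsRow b m)) (⟨E⟩, c, adding)
      = (⟨E ++ rowEnt c r (p0 : Int) (idsRow b m) line⟩, c + line.length, adding ++ idsRow c line.length) := by
  induction line with
  | nil =>
    intro p0 E c adding _ _ _
    rw [PySem.List.enumerate_nil, List.foldl_nil]
    simp [rowEnt, idsRow]
  | cons v vs ih =>
    intro p0 E c adding hc hfresh Hprev
    rw [PySem.List.enumerate.eq_2, List.foldl_cons]
    have hstep : AInnerStep r (idsRow b m) (⟨E⟩, c, adding) ((p0 : Int), v)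
        = (⟨E ++ [(c + 1, BEntry (idsRow b m) r (p0 : Int) v)]⟩, c + 1, adding ++ [c + 1]) := by
      unfold AInnerStep
      rw [show (r == 0) = false by simpa using hr]
      simp only [Bool.false_eq_true, if_false]
      rw [dict_insert_fresh E (c + 1) _ (fun pr hpr => by have := hfresh pr hpr; omega)]
      rw [A_foldJ b (c + 1) r ((p0 : Int)) (by positivity) m E _
        (fun pr hpr => by have := hfresh pr hpr; omega)
        (fun j hj => by have : (j : Int) < (m : Int) := by exact_mod_cast hj
                        omega)
        Hprev]
      rw [← BEntry_eq_folded b r ((p0 : Int)) v m hr (by positivity)]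
    rw [hstep]
    have hcast : ((p0 : Int)) + 1 = ((p0 + 1 : Nat) : Int) := by push_cast; ring
    rw [hcast]
    rw [ih (p0 + 1) (E ++ [(c + 1, BEntry (idsRow b m) r (p0 : Int) v)]) (c + 1) (adding ++ [c + 1])
      (by push_cast; omega)
      (by
        intro pr hpr
        simp only [List.mem_append, List.mem_singleton] at hpr
        rcases hpr with hpr | rfl
        · have := hfresh pr hpr; omega
        · simp)
      (by
        intro j hj
        obtain ⟨d, hd, h1, h2⟩ := Hprev j hj
        refine ⟨d, ?_, h1, h2⟩
        rw [dict_get?_append_left _ _ _ ?_, hd]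
        intro pr hpr
        simp only [List.mem_singleton] at hpr
        subst hpr
        have : (j : Int) < (m : Int) := by exact_mod_cast hj
        simp only
        omega)]
    rw [rowEnt]
    simp only [Prod.mk.injEq, List.append_assoc, List.singleton_append, List.length_cons]
    refine ⟨rfl, by push_cast; ring, ?_⟩
    rw [idsRow_succ c vs.length]

lemma A_row0 (line : List Int) :
    ∀ (p0 : Nat) (E : List (Int × PySem.Dict String (Option Int))) (c : Int) (adding : List Int) (prev : List Int)
      (hfresh : ∀ pr ∈ E, pr.1 ≤ c),
    (PySem.List.enumerate line (p0 : Int)).foldl (AInnerStep 0 prev) (⟨E⟩, c, adding)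
      = (⟨E ++ rowEnt c 0 (p0 : Int) prev line⟩, c + line.length, adding ++ idsRow c line.length) := by
  induction line with
  | nil =>
    intro p0 E c adding prev _
    rw [PySem.List.enumerate_nil, List.foldl_nil]
    simp [rowEnt, idsRow]
  | cons v vs ih =>
    intro p0 E c adding prev hfresh
    rw [PySem.List.enumerate.eq_2, List.foldl_cons]
    have hstep : AInnerStep 0 prev (⟨E⟩, c, adding) ((p0 : Int), v)
        = (⟨E ++ [(c + 1, BEntry prev 0 (p0 : Int) v)]⟩, c + 1, adding ++ [c + 1]) := by
      unfold AInnerStep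
      rw [show ((0 : Int) == 0) = true by decide, if_pos rfl]
      dsimp only
      rw [dict_insert_fresh E (c + 1) _ (fun pr hpr => by have := hfresh pr hpr; omega)]
      rw [show BEntry prev 0 ((p0 : Int)) v
          = ⟨[("value", some v), ("L", none), ("R", none), ("row", some 0), ("position", some ((p0 : Int)))]⟩
        by simp [BEntry]]
    rw [hstep]
    have hcast : ((p0 : Int)) + 1 = ((p0 + 1 : Nat) : Int) := by push_cast; ring
    rw [hcast]
    rw [ih (p0 + 1) _ (c + 1) (adding ++ [c + 1]) prev
      (by
        intro pr hpr
        simp only [List.mem_append, List.mem_singleton] at hpr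
        rcases hpr with hpr | rfl
        · have := hfresh pr hpr; omega
        · simp)]
    rw [rowEnt]
    simp only [Prod.mk.injEq, List.append_assoc, List.singleton_append, List.length_cons]
    refine ⟨rfl, by push_cast; ring, ?_⟩
    rw [idsRow_succ c vs.length]

-- ---- A: all rows ----
lemma A_rows (rest : List (List Int)) :
    ∀ (r : Nat) (b : Int) (m : Nat) (E : List (Int × PySem.Dict String (Option Int)))
      (hr0 : r = 0 → b + m = 0 ∧ m = 0)
      (hfresh : ∀ pr ∈ E, pr.1 ≤ b + m)
      (Hprev : ∀ j : Nat, j < m → ∃ d, PySem.Dict.get? (⟨E⟩ : NDict) (b + j + 1) = some d ∧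
          d.getD "position" none = some (j : Int) ∧ d.getD "row" none = some ((r : Int) - 1)),
    ((PySem.List.enumerate rest (r : Int)).foldl AOuterStep (⟨E⟩, b + m, idsRow b m)).1.items
      = E ++ specRows (b + m) (r : Int) (idsRow b m) rest := by
  induction rest with
  | nil =>
    intro r b m E _ _ _
    rw [PySem.List.enumerate_nil, List.foldl_nil]
    simp [specRows]
  | cons line rest' ih =>
    intro r b m E hr0 hfresh Hprev
    rw [PySem.List.enumerate.eq_2, List.foldl_cons]
    have houter : AOuterStep (⟨E⟩, b + m, idsRow b m) ((r : Int), line)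
        = (⟨E ++ rowEnt (b + m) (r : Int) 0 (idsRow b m) line⟩,
           (b + m) + line.length, idsRow (b + m) line.length) := by
      unfold AOuterStep
      by_cases hr : r = 0
      · subst hr
        simp only [Nat.cast_zero]
        rw [show PySem.List.enumerate line 0 = PySem.List.enumerate line ((0 : Nat) : Int) by norm_num]
        rw [A_row0 line 0 E (b + m) [] (idsRow b m) hfresh]
        dsimp only
        simp only [List.nil_append]
        rw [PySem.Set.ofList_eq_self_of_nodup _ (idsRow_nodup _ _)]
        simp
      · rw [show PySem.List.enumerate line 0 = PySem.List.enumerate line ((0 : Nat) : Int) by norm_num]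
        rw [A_rowN (r : Int) (by exact_mod_cast hr) b m line 0 E (b + m) []
          (by push_cast; ring) hfresh Hprev]
        dsimp only
        simp only [List.nil_append]
        rw [PySem.Set.ofList_eq_self_of_nodup _ (idsRow_nodup _ _)]
        simp
    rw [houter]
    have hfresh' : ∀ pr ∈ E ++ rowEnt (b + m) (r : Int) 0 (idsRow b m) line,
        pr.1 ≤ (b + m) + (line.length : Int) := by
      intro pr hpr
      simp only [List.mem_append] at hpr
      rcases hpr with hpr | hpr
      · have := hfresh pr hpr; omega
      · have := rowEnt_keys ((r : Int)) (idsRow b m) line (b + m) 0 pr hpr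
        omega
    have Hprev' : ∀ j : Nat, j < line.length →
        ∃ d, PySem.Dict.get? (⟨E ++ rowEnt (b + m) (r : Int) 0 (idsRow b m) line⟩ : NDict)
            ((b + m) + j + 1) = some d ∧
          d.getD "position" none = some (j : Int) ∧
          d.getD "row" none = some (((r + 1 : Nat) : Int) - 1) := by
      intro j hj
      refine ⟨BEntry (idsRow b m) (r : Int) ((0 : Int) + j) (line.getD j 0), ?_, ?_, ?_⟩
      · rw [dict_get?_append_right _ _ _ (fun pr hpr => by
          have := hfresh pr hpr
          have hj0 : (0 : Int) ≤ (j : Int) := by positivity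
          omega)]
        exact rowEnt_get ((r : Int)) (idsRow b m) line (b + m) 0 j hj
      · rw [BEntry_position]
        norm_num
      · rw [BEntry_row]
        congr 1
        push_cast
        ring
    have ihp := ih (r + 1) (b + m) line.length
      (E ++ rowEnt (b + m) (r : Int) 0 (idsRow b m) line)
      (by omega) hfresh' Hprev'
    rw [show ((r + 1 : Nat) : Int) = (r : Int) + 1 by push_cast; ring] at ihp
    rw [ihp, specRows]
    rw [List.append_assoc]

lemma A_spec (tree : List (List Int)) :
    buildTreeGroundUp tree = (specRows 0 0 [] tree).map (fun kv => (kv.1, kv.2.items)) := by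
  unfold buildTreeGroundUp
  have h := A_rows tree 0 0 0 []
    (fun _ => ⟨by simp, rfl⟩) (by simp)
    (by intro j hj; simp at hj)
  simp only [Nat.cast_zero, add_zero] at h
  have hids : idsRow 0 0 = [] := by simp [idsRow]
  rw [hids] at h
  rw [show PySem.List.enumerate tree = PySem.List.enumerate tree ((0 : Nat) : Int) by norm_num]
  rw [show (PySem.Dict.empty : NDict) = ⟨[]⟩ from rfl]
  dsimp only
  rw [show ((0 : Nat) : Int) = 0 by norm_num]
  rw [h]
  simp

-- ===== VERDICT (by name: the statement is the Claim_ definition above) =====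
theorem buildTreeGroundUp_spec : Claim_equal_buildTreeGroundUp := by
  intro tree _
  unfold Spec_buildTreeGroundUp
  rw [A_spec, B_spec]
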